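-- pv_equiv track=rewrite | github.com/ajinkyapande156/apeiron | apeiron/libs/ahv/workflows/one_click/feat_manager.py | fetch_suite_details
-- ===== SOURCE A (Python) =====
-- import copy
--
-- def fetch_suite_details(feat_dict, pipeline=None):
--   """
--   A method to fetch the suite details from the feature dictionary.
--
--   Args:
--     feat_dict(dict): Feature Dictionary.
--     pipeline(str): Pipeline Frequency.
--
--   Returns:
--     new_feat_dict(dict): Final Feature Dictionary.
--   """
--   new_feat_dict = copy.deepcopy(feat_dict)
--   if pipeline is not None:#pylint: disable=too-many-nested-blocks
--     for suite in feat_dict.keys():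
--       if suite not in ["UPGRADE"]:
--         for feat in feat_dict[suite].keys():
--           suite_feat_dict = feat_dict[suite][feat]
--           if not suite_feat_dict.get("pipeline"):
--             del new_feat_dict[suite][feat]
--           else:
--             if suite_feat_dict.get("pipeline") != pipeline:
--               del new_feat_dict[suite][feat]
--
--   empty_suite_list = []
--   for suite in list(new_feat_dict):
--     if not bool(new_feat_dict[suite]):
--       empty_suite_list.append(suite)
--
--   for suite in empty_suite_list:
--     del new_feat_dict[suite]
--
--   return new_feat_dict
-- ===== SOURCE B (Python) =====
-- import copy
--
-- def fetch_suite_details(feat_dict, pipeline=None):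
--   """Build the filtered dictionary from scratch in one pass (no deepcopy-then-delete)."""
--   new_feat_dict = {}
--   for suite, feats in feat_dict.items():
--     if pipeline is None or suite == "UPGRADE":
--       kept = copy.deepcopy(feats)
--     else:
--       kept = {feat: copy.deepcopy(val) for feat, val in feats.items()
--               if val.get("pipeline") and val.get("pipeline") == pipeline}
--     if kept:
--       new_feat_dict[suite] = kept
--   return new_feat_dict
-- ===== Notes on version B (the rewrite author's own statement) =====
-- stated objective: simpler
-- what changed: B builds the result dict from scratch in a single pass (per-suite comprehension keeps matching features, suite added only if non-empty) instead of A's deepcopy of the whole dict followed by in-place deletions and a separate empty-suite sweep.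
import Mathlib
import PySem

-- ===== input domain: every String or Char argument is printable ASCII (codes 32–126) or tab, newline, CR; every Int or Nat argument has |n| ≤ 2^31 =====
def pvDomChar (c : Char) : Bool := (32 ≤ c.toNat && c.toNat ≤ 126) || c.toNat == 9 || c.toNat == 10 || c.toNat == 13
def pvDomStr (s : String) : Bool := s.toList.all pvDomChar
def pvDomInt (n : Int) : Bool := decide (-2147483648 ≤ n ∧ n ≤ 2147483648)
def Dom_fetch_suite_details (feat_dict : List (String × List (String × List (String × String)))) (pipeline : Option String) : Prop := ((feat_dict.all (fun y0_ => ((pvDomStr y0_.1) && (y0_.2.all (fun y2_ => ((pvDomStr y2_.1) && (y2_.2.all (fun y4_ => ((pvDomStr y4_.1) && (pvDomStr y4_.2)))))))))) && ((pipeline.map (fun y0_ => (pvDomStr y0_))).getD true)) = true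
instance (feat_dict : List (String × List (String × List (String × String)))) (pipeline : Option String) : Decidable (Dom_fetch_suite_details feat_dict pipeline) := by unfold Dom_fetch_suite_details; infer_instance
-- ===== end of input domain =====

-- B builds the output dict from scratch in one pass (keep matching features, add a suite only
-- if non-empty) instead of A's deepcopy-then-delete with a separate empty-suite sweep: simpler.
-- Dicts are association lists; Pre_ restricts to the unambiguous (duplicate-free) representation.

-- ===== PORT A =====
-- d.get(k) / d[k] on an association list (first match; keys are unique under Pre_)
def pvLookup {β : Type} : List (String × β) → String → Option β
  | [], _ => none
  | (k, v) :: t, x => if k = x then some v else pvLookup t x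

-- 'del d[k]' on an association list (removes the first, under Pre_ the only, entry for k)
def pvDelKey {β : Type} : List (String × β) → String → List (String × β)
  | [], _ => []
  | (k, v) :: t, x => if k = x then t else (k, v) :: pvDelKey t x

-- 'del new_feat_dict[suite][feat]'
def pvDelFeat (nd : List (String × List (String × List (String × String)))) (suite feat : String) :
    List (String × List (String × List (String × String))) :=
  nd.map (fun p => if p.1 = suite then (p.1, pvDelKey p.2 feat) else p)

def fetch_suite_details (feat_dict : List (String × List (String × List (String × String)))) (pipeline : Option String) : List (String × List (String × List (String × String))) :=
  -- new_feat_dict = copy.deepcopy(feat_dict); deepcopy is the identity on immutable values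
  let nd1 :=
    match pipeline with
    | none => feat_dict
    | some p =>
      feat_dict.foldl (fun nd (su : String × List (String × List (String × String))) =>
        if su.1 = "UPGRADE" then nd
        else
          su.2.foldl (fun nd (fe : String × List (String × String)) =>
            match pvLookup fe.2 "pipeline" with
            | none => pvDelFeat nd su.1 fe.1                       -- falsy: missing
            | some s =>
              if s = "" then pvDelFeat nd su.1 fe.1                -- falsy: empty string
              else if s ≠ p then pvDelFeat nd su.1 fe.1 else nd) nd) feat_dict
  let empty_suite_list :=
    nd1.foldl (fun acc (su : String × List (String × List (String × String))) => if su.2 = [] then acc ++ [su.1] else acc) ([] : List String)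
  empty_suite_list.foldl (fun nd s => pvDelKey nd s) nd1

-- ===== PORT B =====
-- 'val.get("pipeline") and val.get("pipeline") == pipeline' (the comprehension's condition)
def pvKeep (p : String) (fe : String × List (String × String)) : Bool :=
  match pvLookup fe.2 "pipeline" with
  | some s => decide (s ≠ "") && decide (s = p)
  | none => false

def fetch_suite_details_alt (feat_dict : List (String × List (String × List (String × String)))) (pipeline : Option String) : List (String × List (String × List (String × String))) :=
  feat_dict.foldl (fun out su =>
    let kept :=
      match pipeline with
      | none => su.2
      | some p => if su.1 = "UPGRADE" then su.2 else su.2.filter (pvKeep p)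
    if kept ≠ [] then out ++ [(su.1, kept)] else out) []

-- ===== PRECONDITION & SPEC =====
-- Pre_ excludes association lists with duplicate keys at any level: a Python dict cannot hold
-- duplicate keys, so such lists do not represent an input A's dicts can take (the dict collapse
-- of duplicates makes the list representation ambiguous); Pre_ does not bound sizes or values.
def Pre_fetch_suite_details (feat_dict : List (String × List (String × List (String × String)))) (pipeline : Option String) : Prop :=
  (feat_dict.map (·.1)).Nodup ∧
    ∀ p ∈ feat_dict, (p.2.map (·.1)).Nodup ∧ ∀ q ∈ p.2, (q.2.map (·.1)).Nodup
instance (feat_dict : List (String × List (String × List (String × String)))) (pipeline : Option String) : Decidable (Pre_fetch_suite_details feat_dict pipeline) := by unfold Pre_fetch_suite_details; infer_instance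

def pvWitness_fetch_suite_details : (List (String × List (String × List (String × String)))) × Option String :=
  ([("CORE", [("f1", [("pipeline", "daily")]), ("f2", [("pipeline", "weekly")])]), ("UPGRADE", [("up", [])])], some "daily")

def Spec_fetch_suite_details (feat_dict : List (String × List (String × List (String × String)))) (pipeline : Option String) (out : List (String × List (String × List (String × String)))) : Prop := out = fetch_suite_details_alt feat_dict pipeline
instance (feat_dict : List (String × List (String × List (String × String)))) (pipeline : Option String) (out : List (String × List (String × List (String × String)))) : Decidable (Spec_fetch_suite_details feat_dict pipeline out) := by unfold Spec_fetch_suite_details; infer_instance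

-- ===== CLAIM (what is proved, stated in full; the proofs are below) =====
def Claim_equal_fetch_suite_details : Prop := ∀ (feat_dict : List (String × List (String × List (String × String)))) (pipeline : Option String), Dom_fetch_suite_details feat_dict pipeline → Pre_fetch_suite_details feat_dict pipeline → Spec_fetch_suite_details feat_dict pipeline (fetch_suite_details feat_dict pipeline)

-- ===== LEMMAS AND PROOFS =====
theorem stepA_eq (p su1 : String) (nd : List (String × List (String × List (String × String)))) (fe : String × List (String × String)) :
    (match pvLookup fe.2 "pipeline" with
      | none => pvDelFeat nd su1 fe.1
      | some s => if s = "" then pvDelFeat nd su1 fe.1 else if s ≠ p then pvDelFeat nd su1 fe.1 else nd)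
    = if pvKeep p fe then nd else pvDelFeat nd su1 fe.1 := by
  unfold pvKeep
  cases h : pvLookup fe.2 "pipeline" with
  | none => simp
  | some s =>
    by_cases h1 : s = "" <;> by_cases h2 : s = p <;> simp [h1, h2]

theorem pvDelKey_eq_filter {β : Type} (l : List (String × β)) (k : String)
    (h : (l.map (·.1)).Nodup) : pvDelKey l k = l.filter (fun q => q.1 ≠ k) := by
  induction l with
  | nil => rfl
  | cons a t ih =>
    obtain ⟨ak, av⟩ := a
    simp only [List.map_cons, List.nodup_cons, List.mem_map] at h
    obtain ⟨h1, h2⟩ := h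
    by_cases hk : ak = k
    · subst hk
      have ht : List.filter (fun q => !decide (q.1 = ak)) t = t :=
        List.filter_eq_self.mpr (fun q hq => by
          simp only [Bool.not_eq_eq_eq_not, Bool.not_true, decide_eq_false_iff_not]
          exact fun hc => h1 ⟨q, hq, hc⟩)
      simp [pvDelKey]
      exact ht.symm
    · simp [pvDelKey, hk, ih h2, List.filter_cons]

theorem nodup_keys_filter {β : Type} (l : List (String × β)) (f : String × β → Bool)
    (h : (l.map (·.1)).Nodup) : ((l.filter f).map (·.1)).Nodup :=
  by
  have hs := List.filter_sublist (p := f) (l := l)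
  exact (hs.map (fun x => x.1)).nodup h

theorem foldl_del_eq_filter {β : Type} (keep : String × β → Bool) (fs : List (String × β)) :
    ∀ (acc : List (String × β)), (acc.map (·.1)).Nodup →
    fs.foldl (fun a fe => if keep fe then a else pvDelKey a fe.1) acc
      = acc.filter (fun q => fs.all (fun fe => keep fe || q.1 != fe.1)) := by
  induction fs with
  | nil => intro acc _; simp
  | cons fe t ih =>
    intro acc h
    rw [List.foldl_cons]
    by_cases hk : keep fe
    · rw [if_pos hk, ih acc h]
      apply List.filter_congr
      intro q _
      simp [hk]
    · rw [if_neg hk, pvDelKey_eq_filter acc fe.1 h,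
        ih _ (nodup_keys_filter acc _ h), List.filter_filter]
      apply List.filter_congr
      intro q _
      simp [hk, bne, beq_eq_decide, Bool.and_comm]

theorem filter_all_eq_filter_keep {β : Type} (keep : String × β → Bool) (fs : List (String × β))
    (h : (fs.map (·.1)).Nodup) :
    fs.filter (fun q => fs.all (fun fe => keep fe || q.1 != fe.1)) = fs.filter keep := by
  apply List.filter_congr
  intro q hq
  by_cases hk : keep q
  · simp only [hk]
    rw [List.all_eq_true]
    · intro fe hfe
      by_cases he : q.1 = fe.1
      · have : q = fe := List.inj_on_of_nodup_map h hq hfe he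
        simp [this ▸ hk]
      · simp [bne, he]
  · simp only [hk]
    rw [Bool.eq_false_iff, ne_eq, List.all_eq_true]
    intro hall
    have := hall q hq
    simp [hk, bne] at this

def pvInnerDel (p : String) (l : List (String × List (String × String)))
    (fs : List (String × List (String × String))) : List (String × List (String × String)) :=
  fs.foldl (fun a fe => if pvKeep p fe then a else pvDelKey a fe.1) l

theorem foldl_delFeat_eq_map (p su1 : String) (fs : List (String × List (String × String))) :
    ∀ (nd : List (String × List (String × List (String × String)))),
    fs.foldl (fun nd fe => if pvKeep p fe then nd else pvDelFeat nd su1 fe.1) nd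
      = nd.map (fun q => (q.1, if q.1 = su1 then pvInnerDel p q.2 fs else q.2)) := by
  induction fs with
  | nil =>
    intro nd
    simp [pvInnerDel]
  | cons fe t ih =>
    intro nd
    rw [List.foldl_cons]
    by_cases hk : pvKeep p fe
    · rw [if_pos hk, ih nd]
      apply List.map_congr_left
      intro q _
      have : pvInnerDel p q.2 (fe :: t) = pvInnerDel p q.2 t := by
        simp [pvInnerDel, hk]
      rw [this]
    · rw [if_neg hk, ih (pvDelFeat nd su1 fe.1), pvDelFeat, List.map_map]
      apply List.map_congr_left
      intro q _
      by_cases hq : q.1 = su1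
      · have : pvInnerDel p q.2 (fe :: t) = pvInnerDel p (pvDelKey q.2 fe.1) t := by
          simp [pvInnerDel, hk]
        simp [Function.comp, hq, this]
      · simp [Function.comp, hq]

theorem foldl_outer_eq_map (p : String) :
    ∀ (todo acc : List (String × List (String × List (String × String)))),
    (acc.map (·.1)).Nodup → (todo.map (·.1)).Nodup →
    (∀ q ∈ todo, q ∈ acc) → (∀ q ∈ todo, (q.2.map (·.1)).Nodup) →
    todo.foldl (fun nd su => if su.1 = "UPGRADE" then nd
        else su.2.foldl (fun nd fe => if pvKeep p fe then nd else pvDelFeat nd su.1 fe.1) nd) acc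
      = acc.map (fun q =>
          (q.1, if q.1 ≠ "UPGRADE" ∧ ∃ r ∈ todo, r.1 = q.1 then q.2.filter (pvKeep p) else q.2)) := by
  intro todo
  induction todo with
  | nil =>
    intro acc _ _ _ _
    simp
  | cons su t ih =>
    intro acc hacc htodo hsub hinn
    simp only [List.map_cons, List.nodup_cons] at htodo
    obtain ⟨hsu1, ht⟩ := htodo
    rw [List.foldl_cons]
    by_cases hU : su.1 = "UPGRADE"
    · rw [if_pos hU, ih acc hacc ht (fun q hq => hsub q (List.mem_cons_of_mem _ hq))
        (fun q hq => hinn q (List.mem_cons_of_mem _ hq))]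
      apply List.map_congr_left
      intro q _
      congr 1
      apply if_congr _ rfl rfl
      constructor
      · rintro ⟨h1, r, hr, hr1⟩
        exact ⟨h1, r, List.mem_cons_of_mem _ hr, hr1⟩
      · rintro ⟨h1, r, hr, hr1⟩
        rcases List.mem_cons.mp hr with h | h
        · exact absurd (hr1 ▸ h ▸ hU) h1
        · exact ⟨h1, r, h, hr1⟩
    · rw [if_neg hU, foldl_delFeat_eq_map]
      set f : (String × List (String × List (String × String))) → (String × List (String × List (String × String))) :=
        fun q => (q.1, if q.1 = su.1 then pvInnerDel p q.2 su.2 else q.2) with hf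
      have hmapkeys : ((acc.map f).map (·.1)) = acc.map (·.1) := by
        rw [List.map_map]; rfl
      have hacc' : ((acc.map f).map (·.1)).Nodup := by rw [hmapkeys]; exact hacc
      have hsub' : ∀ q ∈ t, q ∈ acc.map f := by
        intro q hq
        have hq1 : q.1 ≠ su.1 := by
          intro he
          exact hsu1 (by
            rw [← he]
            exact List.mem_map_of_mem hq)
        have : f q = q := by simp [hf, hq1]
        rw [← this]
        exact List.mem_map_of_mem (hsub q (List.mem_cons_of_mem _ hq))
      rw [ih (acc.map f) hacc' ht hsub' (fun q hq => hinn q (List.mem_cons_of_mem _ hq)),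
        List.map_map]
      apply List.map_congr_left
      intro q hqacc
      simp only [Function.comp, hf]
      by_cases hq : q.1 = su.1
      · have hqsu : q = su :=
          List.inj_on_of_nodup_map hacc hqacc (hsub su (List.mem_cons_self)) hq
        have hnot : ¬∃ r ∈ t, r.1 = q.1 := by
          rintro ⟨r, hr, hr1⟩
          exact hsu1 (hq ▸ hr1 ▸ List.mem_map_of_mem hr)
        rw [if_pos hq, if_neg (fun hc => hnot hc.2), if_pos ⟨hq ▸ hU, su, List.mem_cons_self, hq.symm⟩]
        have hfs : (su.2.map (·.1)).Nodup := hinn su List.mem_cons_self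
        rw [hqsu, pvInnerDel, foldl_del_eq_filter (pvKeep p) su.2 su.2 hfs,
          filter_all_eq_filter_keep (pvKeep p) su.2 hfs]
      · rw [if_neg hq]
        congr 1
        apply if_congr _ rfl rfl
        constructor
        · rintro ⟨h1, r, hr, hr1⟩
          exact ⟨h1, r, List.mem_cons_of_mem _ hr, hr1⟩
        · rintro ⟨h1, r, hr, hr1⟩
          rcases List.mem_cons.mp hr with h | h
          · exact absurd (hr1.symm.trans (congrArg Prod.fst h)) hq
          · exact ⟨h1, r, h, hr1⟩

theorem collect_empty (l : List (String × List (String × List (String × String)))) :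
    ∀ acc, l.foldl (fun acc su => if su.2 = [] then acc ++ [su.1] else acc) acc
      = acc ++ (l.filter (fun su => su.2.isEmpty)).map (·.1) := by
  induction l with
  | nil => intro acc; simp
  | cons su t ih =>
    intro acc
    rw [List.foldl_cons]
    by_cases he : su.2 = []
    · rw [if_pos he, ih, List.filter_cons, if_pos (by simp [he])]
      simp
    · rw [if_neg he, ih, List.filter_cons,
        if_neg (by simp [List.isEmpty_iff, he])]

theorem foldl_delKey_eq_filter {β : Type} (ks : List String) :
    ∀ (l : List (String × β)), (l.map (·.1)).Nodup →
    ks.foldl (fun a k => pvDelKey a k) l = l.filter (fun q => !ks.contains q.1) := by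
  induction ks with
  | nil => intro l _; simp
  | cons k t ih =>
    intro l h
    rw [List.foldl_cons, pvDelKey_eq_filter l k h, ih _ (nodup_keys_filter l _ h),
      List.filter_filter]
    apply List.filter_congr
    intro q _
    simp [List.contains_cons, Bool.and_comm, beq_eq_decide, eq_comm]

theorem empty_sweep (nd : List (String × List (String × List (String × String))))
    (h : (nd.map (·.1)).Nodup) :
    (nd.foldl (fun acc su => if su.2 = [] then acc ++ [su.1] else acc) ([] : List String)).foldl
        (fun a s => pvDelKey a s) nd
      = nd.filter (fun q => !q.2.isEmpty) := by
  rw [collect_empty, List.nil_append, foldl_delKey_eq_filter _ nd h]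
  apply List.filter_congr
  intro q hq
  by_cases he : q.2 = []
  · have hmem : q.1 ∈ ((nd.filter (fun su => su.2.isEmpty)).map (·.1)) :=
      List.mem_map_of_mem (List.mem_filter.mpr ⟨hq, by simp [he]⟩)
    have hc : ((nd.filter (fun su => su.2.isEmpty)).map (·.1)).contains q.1 = true :=
      List.contains_iff_mem.mpr hmem
    rw [hc, show q.2.isEmpty = true by simp [he]]
  · have hmem : q.1 ∉ ((nd.filter (fun su => su.2.isEmpty)).map (·.1)) := by
      intro hc
      obtain ⟨r, hr, hr1⟩ := List.mem_map.mp hc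
      have hrnd := (List.mem_filter.mp hr).1
      have hre : r.2.isEmpty = true := (List.mem_filter.mp hr).2
      have : r = q := List.inj_on_of_nodup_map h hrnd hq hr1
      rw [this] at hre
      exact he (List.isEmpty_iff.mp hre)
    have hc : ((nd.filter (fun su => su.2.isEmpty)).map (·.1)).contains q.1 = false := by
      rw [← Bool.not_eq_true, List.contains_iff_mem]
      exact hmem
    rw [hc, show q.2.isEmpty = false by simp [List.isEmpty_iff, he]]

theorem foldl_B_eq_filter_map (h : (String × List (String × List (String × String))) → List (String × List (String × String)))
    (l : List (String × List (String × List (String × String)))) :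
    ∀ acc, l.foldl (fun out su => if h su ≠ [] then out ++ [(su.1, h su)] else out) acc
      = acc ++ ((l.map (fun su => (su.1, h su))).filter (fun q => !q.2.isEmpty)) := by
  induction l with
  | nil => intro acc; simp
  | cons su t ih =>
    intro acc
    rw [List.foldl_cons]
    by_cases he : h su = []
    · rw [if_neg (by simp [he]), ih, List.map_cons, List.filter_cons,
        if_neg (by simp [he])]
    · rw [if_pos (by simp [he]), ih, List.map_cons, List.filter_cons,
        if_pos (by simp [List.isEmpty_iff, he])]
      simp

-- ===== VERDICT (by name: the statement is the Claim_ definition above) =====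
theorem fetch_suite_details_spec : Claim_equal_fetch_suite_details := by
  intro fd pl _hdom hpre
  obtain ⟨hnd, hin⟩ := hpre
  show fetch_suite_details fd pl = fetch_suite_details_alt fd pl
  cases pl with
  | none =>
    have hA : fetch_suite_details fd none = fd.filter (fun q => !q.2.isEmpty) :=
      empty_sweep fd hnd
    have hB : fetch_suite_details_alt fd none
        = [] ++ ((fd.map (fun su => (su.1, su.2))).filter (fun q => !q.2.isEmpty)) :=
      foldl_B_eq_filter_map (fun su => su.2) fd []
    rw [hA, hB]
    simp
  | some p =>
    have hfun : (fun (nd : List (String × List (String × List (String × String))))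
          (su : String × List (String × List (String × String))) =>
          if su.1 = "UPGRADE" then nd
          else su.2.foldl (fun nd (fe : String × List (String × String)) =>
            match pvLookup fe.2 "pipeline" with
            | none => pvDelFeat nd su.1 fe.1
            | some s =>
              if s = "" then pvDelFeat nd su.1 fe.1
              else if s ≠ p then pvDelFeat nd su.1 fe.1 else nd) nd)
        = (fun nd su => if su.1 = "UPGRADE" then nd
            else su.2.foldl (fun nd fe => if pvKeep p fe then nd else pvDelFeat nd su.1 fe.1) nd) := by
      funext nd su
      by_cases hU : su.1 = "UPGRADE"
      · rw [if_pos hU, if_pos hU]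
      · rw [if_neg hU, if_neg hU]
        congr 1
        funext nd fe
        exact stepA_eq p su.1 nd fe
    have houter : fd.foldl (fun (nd : List (String × List (String × List (String × String))))
          (su : String × List (String × List (String × String))) =>
          if su.1 = "UPGRADE" then nd
          else su.2.foldl (fun nd (fe : String × List (String × String)) =>
            match pvLookup fe.2 "pipeline" with
            | none => pvDelFeat nd su.1 fe.1
            | some s =>
              if s = "" then pvDelFeat nd su.1 fe.1
              else if s ≠ p then pvDelFeat nd su.1 fe.1 else nd) nd) fd
        = fd.map (fun q => (q.1, if q.1 = "UPGRADE" then q.2 else q.2.filter (pvKeep p))) := by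
      rw [hfun, foldl_outer_eq_map p fd fd hnd hnd (fun q h => h) (fun q h => (hin q h).1)]
      apply List.map_congr_left
      intro q hq
      by_cases hU : q.1 = "UPGRADE"
      · rw [if_pos hU, if_neg (fun hc => hc.1 hU)]
      · rw [if_neg hU, if_pos ⟨hU, q, hq, rfl⟩]
    have hndA : ((fd.map (fun q => (q.1, if q.1 = "UPGRADE" then q.2 else q.2.filter (pvKeep p)))).map (·.1)).Nodup := by
      rw [List.map_map]
      exact hnd
    have hA : fetch_suite_details fd (some p)
        = (fd.map (fun q => (q.1, if q.1 = "UPGRADE" then q.2 else q.2.filter (pvKeep p)))).filter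
            (fun q => !q.2.isEmpty) := by
      show ((fd.foldl _ fd).foldl (fun acc su => if su.2 = [] then acc ++ [su.1] else acc) []).foldl
          (fun a s => pvDelKey a s) (fd.foldl _ fd) = _
      rw [houter]
      exact empty_sweep _ hndA
    have hB : fetch_suite_details_alt fd (some p)
        = [] ++ ((fd.map (fun su => (su.1, if su.1 = "UPGRADE" then su.2 else su.2.filter (pvKeep p)))).filter
            (fun q => !q.2.isEmpty)) :=
      foldl_B_eq_filter_map (fun su => if su.1 = "UPGRADE" then su.2 else su.2.filter (pvKeep p)) fd []
    rw [hA, hB, List.nil_append]
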